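-- pv_equiv track=rewrite | github.com/genius8820/pysf-hw2 | main.py | Pinpen_cipher_encrypt
-- ===== SOURCE A (Python) =====
-- def Pinpen_cipher_encrypt(strr):
--     dictt={"a":chr(5287),"b":chr(8852),"c":chr(5290),"d":chr(8848),"e":chr(9633),
--        "f":chr(8847),"g":chr(5283),"h":chr(8851),"i":chr(5285),
--        "j":chr(5287)+"x","k":chr(8852)+"x","l":chr(5290)+"x","m":chr(8848)+"x",
--        "n":chr(9633)+"x","o":chr(8847)+"x","p":chr(5283)+"x","q":chr(8851)+"x",
--        "r":chr(5285)+"x",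
--        "s":chr(5287)+"o","t":chr(8852)+"o","u":chr(5290)+"o","v":chr(8848)+"o",
--        "w":chr(9633)+"o","x":chr(8847)+"o","y":chr(5283)+"o","z":chr(8851)+"o"}
--     x=""
--     for i in range(0,len(strr)):
--         if strr[i] in dictt and strr[i]!=" ":
--             y=dictt[strr[i]]
--             x+=y[0:2]
--         else:
--             x+=" "
--     return x
-- ===== SOURCE B (Python) =====
-- def Pinpen_cipher_encrypt(strr):
--     # Letter-major: start from an all-spaces output and, for each of the 26
--     # alphabet letters, overwrite every position where it occurs with its cipher.
--     out = [' '] * len(strr)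
--     bases = [chr(5287), chr(8852), chr(5290), chr(8848), chr(9633),
--              chr(8847), chr(5283), chr(8851), chr(5285)]
--     for k in range(26):
--         letter = chr(97 + k)
--         cipher = bases[k % 9] + ('' if k < 9 else 'x' if k < 18 else 'o')
--         for pos, ch in enumerate(strr):
--             if ch == letter:
--                 out[pos] = cipher
--     return ''.join(out)
-- ===== Notes on version B (the rewrite author's own statement) =====
-- stated objective: alternative
-- what changed: Instead of A's single left-to-right pass that looks each character up in a 26-entry substitution dictionary, B starts from an all-spaces output list and loops letter-major over the 26 alphabet letters, computing each letter's cipher arithmetically (base symbol index k % 9, suffix from k // 9 thresholds) and overwriting every position where that letter occurs; the pieces are joined at the end.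
import Mathlib
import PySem

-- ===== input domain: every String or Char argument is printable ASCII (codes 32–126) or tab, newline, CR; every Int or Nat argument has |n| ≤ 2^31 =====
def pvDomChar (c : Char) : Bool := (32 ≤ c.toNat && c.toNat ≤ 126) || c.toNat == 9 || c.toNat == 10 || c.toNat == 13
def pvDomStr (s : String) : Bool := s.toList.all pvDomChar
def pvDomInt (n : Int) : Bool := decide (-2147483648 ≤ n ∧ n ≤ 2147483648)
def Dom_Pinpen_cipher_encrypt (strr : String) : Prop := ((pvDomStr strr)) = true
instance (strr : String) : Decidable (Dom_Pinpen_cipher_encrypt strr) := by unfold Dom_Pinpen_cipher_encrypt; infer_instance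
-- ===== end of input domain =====

-- B replaces A's per-character dictionary-lookup pass by a letter-major algorithm:
-- start from an all-spaces output and, for each of the 26 alphabet letters,
-- overwrite every position where it occurs with its cipher — objective: alternative.

-- ===== PORT A =====
-- A's literal substitution dictionary (values as List Char, Python str under the convention)
def pinpenDict : PySem.Dict Char (List Char) := PySem.Dict.ofList
  [('a', [Char.ofNat 5287]), ('b', [Char.ofNat 8852]), ('c', [Char.ofNat 5290]),
   ('d', [Char.ofNat 8848]), ('e', [Char.ofNat 9633]), ('f', [Char.ofNat 8847]),
   ('g', [Char.ofNat 5283]), ('h', [Char.ofNat 8851]), ('i', [Char.ofNat 5285]),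
   ('j', [Char.ofNat 5287, 'x']), ('k', [Char.ofNat 8852, 'x']), ('l', [Char.ofNat 5290, 'x']),
   ('m', [Char.ofNat 8848, 'x']), ('n', [Char.ofNat 9633, 'x']), ('o', [Char.ofNat 8847, 'x']),
   ('p', [Char.ofNat 5283, 'x']), ('q', [Char.ofNat 8851, 'x']), ('r', [Char.ofNat 5285, 'x']),
   ('s', [Char.ofNat 5287, 'o']), ('t', [Char.ofNat 8852, 'o']), ('u', [Char.ofNat 5290, 'o']),
   ('v', [Char.ofNat 8848, 'o']), ('w', [Char.ofNat 9633, 'o']), ('x', [Char.ofNat 8847, 'o']),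
   ('y', [Char.ofNat 5283, 'o']), ('z', [Char.ofNat 8851, 'o'])]

-- body of A's loop for one character strr[i]
def pinpenStepA (c : Char) : List Char :=
  if pinpenDict.contains c ∧ c ≠ ' ' then
    let y := pinpenDict.getD c []
    PySem.Chars.slice y (some 0) (some 2)     -- y[0:2]
  else [' ']

def Pinpen_cipher_encrypt (strr : String) : String :=
  String.ofList (strr.toList.foldl (fun x c => x ++ pinpenStepA c) [])

-- ===== PORT B =====
def pinpenBases : List Char :=
  [Char.ofNat 5287, Char.ofNat 8852, Char.ofNat 5290, Char.ofNat 8848,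
   Char.ofNat 9633, Char.ofNat 8847, Char.ofNat 5283, Char.ofNat 8851, Char.ofNat 5285]

-- cipher = bases[k % 9] + ('' if k < 9 else 'x' if k < 18 else 'o')
def pinpenCipher (k : Int) : List Char :=
  PySem.List.pyGetD pinpenBases (PySem.Int.mod k 9) ' ' ::
    (if k < 9 then [] else if k < 18 then ['x'] else ['o'])

-- inner loop: for pos, ch in enumerate(strr): if ch == letter: out[pos] = cipher
def pinpenInner (s : List Char) (letter : Char) (cipher : List Char)
    (out : List (List Char)) : List (List Char) :=
  (PySem.List.enumerate s).foldl
    (fun o pc => if pc.2 = letter then PySem.List.pySetD o pc.1 cipher else o) out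

def Pinpen_cipher_encrypt_alt (strr : String) : String :=
  let s := strr.toList
  let out := (PySem.List.pyRange 0 26 1).foldl
      (fun o k => pinpenInner s (Char.ofNat (97 + k).toNat) (pinpenCipher k) o)
      (List.replicate s.length [' '])          -- out = [' '] * len(strr)
  String.ofList out.flatten                    -- ''.join(out)

-- ===== PRECONDITION & SPEC =====
def Spec_Pinpen_cipher_encrypt (strr : String) (out : String) : Prop := out = Pinpen_cipher_encrypt_alt strr
instance (strr : String) (out : String) : Decidable (Spec_Pinpen_cipher_encrypt strr out) := by unfold Spec_Pinpen_cipher_encrypt; infer_instance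

-- ===== CLAIM =====
def Claim_equal_Pinpen_cipher_encrypt : Prop := ∀ (strr : String), Dom_Pinpen_cipher_encrypt strr → Spec_Pinpen_cipher_encrypt strr (Pinpen_cipher_encrypt strr)

-- ===== LEMMAS AND PROOFS =====

-- proof-side description of what one character becomes
def pinpenStepB (c : Char) : List Char :=
  if 'a' ≤ c ∧ c ≤ 'z' then pinpenCipher ((c.toNat : Int) - 97) else [' ']

-- the two per-character values agree on every character
theorem pinpenStep_eq (c : Char) : pinpenStepA c = pinpenStepB c := by
  by_cases h : 'a' ≤ c ∧ c ≤ 'z'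
  · obtain ⟨h1, h2⟩ := h
    have hlo : 97 ≤ c.toNat := h1
    have hhi : c.toNat ≤ 122 := h2
    interval_cases hc : c.toNat <;>
      (have e : c = Char.ofNat c.toNat := (Char.ofNat_toNat c).symm
       rw [hc] at e; subst e; decide)
  · have hs : pinpenStepB c = [' '] := by simp [pinpenStepB, h]
    rw [hs]
    unfold pinpenStepA
    rw [if_neg]
    rintro ⟨hmem, -⟩
    rw [PySem.Dict.contains_iff_mem_keys] at hmem
    have hk : pinpenDict.keys =
        ['a','b','c','d','e','f','g','h','i','j','k','l','m',
         'n','o','p','q','r','s','t','u','v','w','x','y','z'] := by decide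
    rw [hk] at hmem
    fin_cases hmem <;> exact h ⟨by decide, by decide⟩

theorem foldl_set_get (letter : Char) (cipher : List Char) :
    ∀ (ps : List (Int × Char)), (∀ p ∈ ps, 0 ≤ p.1) → ∀ (out : List (List Char)) (j : Nat),
    (ps.foldl (fun o pc => if pc.2 = letter then PySem.List.pySetD o pc.1 cipher else o) out)[j]?
      = if (∃ p ∈ ps, p.2 = letter ∧ p.1 = (j : Int)) ∧ j < out.length then some cipher
        else out[j]? := by
  intro ps
  induction ps with
  | nil => intro _ out j; simp
  | cons p rest ih =>
    intro hps out j
    have hp0 : 0 ≤ p.1 := hps p (by simp)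
    simp only [List.foldl_cons]
    rw [ih (fun q hq => hps q (by simp [hq]))]
    by_cases hl : p.2 = letter
    · rw [if_pos hl, PySem.List.pySetD_of_nonneg _ _ hp0]
      simp only [List.length_set]
      by_cases hj : p.1 = (j : Int)
      · have hjt : p.1.toNat = j := by omega
        have hcond : ∃ q ∈ p :: rest, q.2 = letter ∧ q.1 = (j : Int) :=
          ⟨p, List.mem_cons_self, hl, hj⟩
        split_ifs with h1 h2 h2
        · rfl
        · exact absurd ⟨hcond, h1.2⟩ h2
        · simp [hjt, h2.2]
        · have hlen : ¬ j < out.length := fun hh => h2 ⟨hcond, hh⟩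
          simp [hjt, hlen]
      · have hjt : p.1.toNat ≠ j := by omega
        rw [List.getElem?_set, if_neg hjt]
        congr 1
        apply propext
        constructor
        · rintro ⟨⟨q, hq, hql, hqj⟩, hlen⟩
          exact ⟨⟨q, List.mem_cons_of_mem _ hq, hql, hqj⟩, hlen⟩
        · rintro ⟨⟨q, hq, hql, hqj⟩, hlen⟩
          rcases List.mem_cons.1 hq with rfl | hq'
          · exact absurd hqj hj
          · exact ⟨⟨q, hq', hql, hqj⟩, hlen⟩
    · rw [if_neg hl]
      congr 1
      apply propext
      constructor
      · rintro ⟨⟨q, hq, hql, hqj⟩, hlen⟩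
        exact ⟨⟨q, List.mem_cons_of_mem _ hq, hql, hqj⟩, hlen⟩
      · rintro ⟨⟨q, hq, hql, hqj⟩, hlen⟩
        rcases List.mem_cons.1 hq with rfl | hq'
        · exact absurd hql hl
        · exact ⟨⟨q, hq', hql, hqj⟩, hlen⟩



theorem pinpenInner_getElem? (s : List Char) (letter : Char) (cipher : List Char)
    (out : List (List Char)) (j : Nat) :
    (pinpenInner s letter cipher out)[j]? =
      if s[j]? = some letter ∧ j < out.length then some cipher else out[j]? := by
  unfold pinpenInner
  rw [foldl_set_get letter cipher _ (by
      intro p hp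
      rw [PySem.List.mem_enumerate_iff] at hp
      obtain ⟨k, hk, rfl⟩ := hp
      simp)]
  congr 1
  apply propext
  constructor
  · rintro ⟨⟨p, hp, hpl, hpj⟩, hlen⟩
    rw [PySem.List.mem_enumerate_iff] at hp
    obtain ⟨k, hk, rfl⟩ := hp
    have : k = j := by simpa using hpj
    subst this
    refine ⟨by rw [List.getElem?_eq_getElem hk]; exact congrArg some hpl, hlen⟩
  · rintro ⟨hsj, hlen⟩
    have hjlt : j < s.length := by
      by_contra hh
      rw [List.getElem?_eq_none_iff.2 (by omega)] at hsj
      simp at hsj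
    refine ⟨⟨((0 : Int) + (j : Int), s[j]), ?_, ?_, by simp⟩, hlen⟩
    · rw [PySem.List.mem_enumerate_iff]
      exact ⟨j, hjlt, rfl⟩
    · show s[j] = letter
      have := List.getElem?_eq_getElem hjlt
      rw [this] at hsj
      exact Option.some.inj hsj




theorem foldl_set_length (letter : Char) (cipher : List Char) :
    ∀ (ps : List (Int × Char)) (out : List (List Char)),
    (ps.foldl (fun o pc => if pc.2 = letter then PySem.List.pySetD o pc.1 cipher else o) out).length
      = out.length := by
  intro ps
  induction ps with
  | nil => intro out; rfl
  | cons p rest ih =>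
    intro out
    simp only [List.foldl_cons]
    rw [ih]
    split <;> simp [PySem.List.length_pySetD]

theorem pinpenInner_length (s : List Char) (letter : Char) (cipher : List Char)
    (out : List (List Char)) : (pinpenInner s letter cipher out).length = out.length := by
  unfold pinpenInner
  exact foldl_set_length letter cipher _ out

theorem stepB_cipher (k : Int) (h0 : 0 ≤ k) (h26 : k < 26) :
    pinpenStepB (Char.ofNat (97 + k).toNat) = pinpenCipher k := by
  interval_cases k <;> decide

theorem pinpenOuter_getElem? (s : List Char) :
    ∀ (ks : List Int), (∀ k ∈ ks, 0 ≤ k ∧ k < 26) → ∀ (out : List (List Char)) (j : Nat),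
    (ks.foldl (fun o k => pinpenInner s (Char.ofNat (97 + k).toNat) (pinpenCipher k) o) out)[j]? =
      if (∃ k ∈ ks, s[j]? = some (Char.ofNat (97 + k).toNat)) ∧ j < out.length then
        some (pinpenStepB (s.getD j ' ')) else out[j]? := by
  intro ks
  induction ks with
  | nil => intro _ out j; simp
  | cons k rest ih =>
    intro hks out j
    obtain ⟨hk0, hk26⟩ := hks k List.mem_cons_self
    simp only [List.foldl_cons]
    rw [ih (fun q hq => hks q (List.mem_cons_of_mem _ hq)), pinpenInner_length,
      pinpenInner_getElem?]
    by_cases hmatch : s[j]? = some (Char.ofNat (97 + k).toNat)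
    · have hjlt : j < s.length := by
        by_contra hh
        rw [List.getElem?_eq_none_iff.2 (by omega)] at hmatch
        simp at hmatch
      have hget : s.getD j ' ' = Char.ofNat (97 + k).toNat := by
        rw [List.getD_eq_getElem?_getD, hmatch]; rfl
      have hstep : pinpenStepB (s.getD j ' ') = pinpenCipher k := by
        rw [hget]; exact stepB_cipher k hk0 hk26
      have hcond : ∃ q ∈ k :: rest, s[j]? = some (Char.ofNat (97 + q).toNat) :=
        ⟨k, List.mem_cons_self, hmatch⟩
      by_cases hlen : j < out.length
      · conv_rhs => rw [if_pos ⟨hcond, hlen⟩]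
        split_ifs with h1 h2
        · rfl
        · rw [hstep]
        · exact absurd ⟨hmatch, hlen⟩ h2
      · simp only [hlen, and_false, if_false]
    · have hB : ¬(s[j]? = some (Char.ofNat (97 + k).toNat) ∧ j < out.length) :=
        fun hh => hmatch hh.1
      rw [if_neg hB]
      congr 1
      apply propext
      constructor
      · rintro ⟨⟨q, hq, hql⟩, hlen⟩
        exact ⟨⟨q, List.mem_cons_of_mem _ hq, hql⟩, hlen⟩
      · rintro ⟨⟨q, hq, hql⟩, hlen⟩
        rcases List.mem_cons.1 hq with rfl | hq'
        · exact absurd hql hmatch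
        · exact ⟨⟨q, hq', hql⟩, hlen⟩

theorem lower_iff (c : Char) :
    (∃ k ∈ PySem.List.pyRange 0 26 1, c = Char.ofNat (97 + k).toNat) ↔
      ('a' ≤ c ∧ c ≤ 'z') := by
  constructor
  · rintro ⟨k, hk, rfl⟩
    rw [PySem.List.mem_pyRange_one] at hk
    obtain ⟨h0, h26⟩ := hk
    interval_cases k <;> exact ⟨by decide, by decide⟩
  · rintro ⟨h1, h2⟩
    refine ⟨(c.toNat : Int) - 97, ?_, ?_⟩
    · rw [PySem.List.mem_pyRange_one]
      have hlo : 97 ≤ c.toNat := h1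
      have hhi : c.toNat ≤ 122 := h2
      omega
    · have : ((97 : Int) + ((c.toNat : Int) - 97)).toNat = c.toNat := by omega
      rw [this, Char.ofNat_toNat]

theorem pinpenAlt_eq_map (s : List Char) :
    (PySem.List.pyRange 0 26 1).foldl
      (fun o k => pinpenInner s (Char.ofNat (97 + k).toNat) (pinpenCipher k) o)
      (List.replicate s.length [' ']) = s.map pinpenStepB := by
  apply List.ext_getElem?
  intro j
  rw [pinpenOuter_getElem? s _ (by
      intro k hk
      rw [PySem.List.mem_pyRange_one] at hk
      omega)]
  by_cases hj : j < s.length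
  · rw [List.getElem?_eq_getElem hj, List.getElem?_map, List.getElem?_eq_getElem hj,
      List.getD_eq_getElem?_getD, List.getElem?_eq_getElem hj]
    simp only [List.length_replicate, Option.map_some, Option.getD_some]
    by_cases hc : 'a' ≤ s[j] ∧ s[j] ≤ 'z'
    · rw [if_pos]
      refine ⟨?_, hj⟩
      obtain ⟨k, hk, he⟩ := (lower_iff s[j]).2 hc
      exact ⟨k, hk, by rw [← he]⟩
    · rw [if_neg, List.getElem?_replicate, if_pos hj]
      · rw [show pinpenStepB s[j] = [' '] from by simp [pinpenStepB, hc]]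
      · rintro ⟨⟨k, hk, he⟩, -⟩
        exact hc ((lower_iff s[j]).1 ⟨k, hk, Option.some.inj he⟩)
  · rw [List.getElem?_eq_none_iff.2 (by omega)]
    rw [if_neg (by rintro ⟨⟨k, hk, he⟩, -⟩; simp at he)]
    rw [List.getElem?_replicate, if_neg (by omega), List.getElem?_map,
      List.getElem?_eq_none_iff.2 (by omega)]
    rfl

-- ===== VERDICT =====
theorem Pinpen_cipher_encrypt_spec : Claim_equal_Pinpen_cipher_encrypt := by
  intro strr _
  unfold Spec_Pinpen_cipher_encrypt Pinpen_cipher_encrypt Pinpen_cipher_encrypt_alt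
  dsimp only
  rw [PySem.List.foldl_append_eq_flatMap, pinpenAlt_eq_map,
    show pinpenStepA = pinpenStepB from funext pinpenStep_eq]
  simp [List.flatMap_def]
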